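-- pv_equiv track=rewrite | github.com/Mart1nRH716/Cripto_pra1 | multi_redux.py | hex_polinomio
-- ===== SOURCE A (Python) =====
-- def hex_polinomio(hex):
--     lista = []
--     cadena_binaria = bin(int(hex, 16))[2:]  # Cambiamos de hexadecimal a binario para identifcar los 1 y guardar las posiciones
--     cadena_binaria = cadena_binaria[::-1]  # Invertimos la lista debido a que al principio se encuentras los bits menos significativos
--     for i in range(len(cadena_binaria)):
--         if cadena_binaria[i] == "1":
--             lista.append(i)  # Guardamos la posicion en una lista del bit encendido
--
--     polinomio = ' '
--     for i in lista[::-1]: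
--         if i == 0:
--             polinomio += "1"
--         else:
--             polinomio += f"x^{i} +"
--     return polinomio
-- ===== SOURCE B (Python) =====
-- def hex_polinomio(hex):
--     m = abs(int(hex, 16))
--     partes = [' ']
--     while m:
--         k = m.bit_length() - 1
--         partes.append("1" if k == 0 else "x^%d +" % k)
--         m -= 1 << k
--     return ''.join(partes)
-- ===== Notes on version B (the rewrite author's own statement) =====
-- stated objective: alternative
-- what changed: B never builds or scans a binary string: it takes abs(int(hex,16)) and iteratively peels the highest set bit with bit_length()/shifts, appending each term to a list that is joined once; A converts to a bin() string, reverses it, collects the set-bit indices into a list and walks that list reversed concatenating strings.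
import Mathlib
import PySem

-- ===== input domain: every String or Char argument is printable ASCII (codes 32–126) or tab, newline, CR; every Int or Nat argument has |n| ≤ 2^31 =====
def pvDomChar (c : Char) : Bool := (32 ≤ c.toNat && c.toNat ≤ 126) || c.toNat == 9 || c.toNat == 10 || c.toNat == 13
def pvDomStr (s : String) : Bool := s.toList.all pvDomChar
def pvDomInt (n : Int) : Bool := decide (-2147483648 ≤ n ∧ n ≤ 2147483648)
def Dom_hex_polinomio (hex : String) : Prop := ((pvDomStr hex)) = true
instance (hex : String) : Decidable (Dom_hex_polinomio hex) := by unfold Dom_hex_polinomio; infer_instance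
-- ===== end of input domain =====

-- B replaces A's bin()-string/reverse/position-list pipeline by integer arithmetic: it peels the
-- highest set bit of abs(int(hex,16)) with bit_length(), emitting each term directly; same return value.

-- ===== PORT A =====
-- A: binary string of int(hex,16), reversed; collect indices of '1' into a list; iterate that list reversed.
def hex_polinomio (hex : String) : String :=
  match PySem.Int.ofStrBase? hex 16 with
  | none => " "   -- unreachable under Pre_: int(hex, 16) raises ValueError
  | some n =>
    let cadena0 : List Char := PySem.List.slice (PySem.Int.pyBin n).toList (some 2) none
    let cadena : List Char := (PySem.List.slice? cadena0 none none (-1)).getD []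
    let lista : List Int := (PySem.List.pyRange 0 cadena.length 1).foldl
      (fun acc i => if PySem.List.pyGet? cadena i = some '1' then acc ++ [i] else acc) []
    let polinomio : List Char :=
      ((PySem.List.slice? lista none none (-1)).getD []).foldl
        (fun p i => if i = 0 then p ++ ['1']
                    else p ++ ('x' :: '^' :: (PySem.Int.toChars i ++ [' ', '+']))) [' ']
    String.ofList polinomio

-- ===== PORT B =====
-- B's while loop: peel the highest set bit k = m.bit_length()-1, append its term to partes, m -= 1 << k.
def pvPartsB (m : Nat) (partes : List (List Char)) : List (List Char) :=
  if h : m = 0 then partes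
  else
    let k : Nat := PySem.Int.bitLength (m : Int) - 1
    pvPartsB (m - 2 ^ k)
      (partes ++ [if k = 0 then ['1'] else 'x' :: '^' :: (PySem.Int.toChars (k : Int) ++ [' ', '+'])])
  termination_by m
  decreasing_by
    have h2 : 2 ^ (PySem.Int.bitLength (m : Int) - 1) ≤ m := by
      have := PySem.Int.two_pow_bitLength_le (m : Int) (by exact_mod_cast h)
      simpa using this
    have h1 : 0 < 2 ^ (PySem.Int.bitLength (m : Int) - 1) := Nat.two_pow_pos _
    omega

-- B: partes = [' ']; while loop; ''.join(partes)
def hex_polinomio_alt (hex : String) : String :=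
  match PySem.Int.ofStrBase? hex 16 with
  | none => " "
  | some n => String.ofList (pvPartsB n.natAbs [[' ']]).flatten

-- ===== PRECONDITION & SPEC =====
-- Pre_ excludes exactly the strings that are not a valid int(·, 16) literal, on which A raises ValueError.
def Pre_hex_polinomio (hex : String) : Prop := (PySem.Int.ofStrBase? hex 16).isSome = true
instance (hex : String) : Decidable (Pre_hex_polinomio hex) := by unfold Pre_hex_polinomio; infer_instance
def pvWitness_hex_polinomio : String := "1a2b"

def Spec_hex_polinomio (hex : String) (out : String) : Prop := out = hex_polinomio_alt hex
instance (hex : String) (out : String) : Decidable (Spec_hex_polinomio hex out) := by unfold Spec_hex_polinomio; infer_instance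

-- ===== CLAIM (what is proved, stated in full; the proofs are below) =====
def Claim_equal_hex_polinomio : Prop := ∀ (hex : String), Dom_hex_polinomio hex → Pre_hex_polinomio hex → Spec_hex_polinomio hex (hex_polinomio hex)

-- ===== LEMMAS AND PROOFS =====

-- the characters A appends for one set bit at position i
def pvTerm (i : Int) : List Char :=
  if i = 0 then ['1'] else 'x' :: '^' :: (PySem.Int.toChars i ++ [' ', '+'])

-- set-bit positions of m, ascending (closed form)
def pvAsc (m : Nat) : List Nat :=
  (List.range (PySem.Int.bitLength (m : Int))).filter (fun i => m.testBit i)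

-- recursion on the peeled value, without the accumulator (proof helper)
def pvTermsB (m : Nat) : List (List Char) :=
  if h : m = 0 then []
  else
    let k : Nat := PySem.Int.bitLength (m : Int) - 1
    (if k = 0 then ['1'] else 'x' :: '^' :: (PySem.Int.toChars (k : Int) ++ [' ', '+']))
      :: pvTermsB (m - 2 ^ k)
  decreasing_by
    have h2 : 2 ^ (PySem.Int.bitLength (m : Int) - 1) ≤ m := by
      have := PySem.Int.two_pow_bitLength_le (m : Int) (by exact_mod_cast h)
      simpa using this
    have h1 : 0 < 2 ^ (PySem.Int.bitLength (m : Int) - 1) := Nat.two_pow_pos _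
    omega

-- the accumulating loop is the plain recursion appended to the accumulator
theorem pv_partsB_acc (m : Nat) : ∀ (acc : List (List Char)),
    pvPartsB m acc = acc ++ pvTermsB m := by
  induction m using Nat.strong_induction_on with
  | _ m ih =>
    intro acc
    rw [pvPartsB.eq_def, pvTermsB.eq_def]
    by_cases h : m = 0
    · simp [h]
    · simp only [h, dite_false]
      set k : Nat := PySem.Int.bitLength (m : Int) - 1 with hk
      have h1 : (1 : Nat) ≤ 2 ^ k := Nat.one_le_two_pow
      have h2 : 2 ^ k ≤ m := by
        have := PySem.Int.two_pow_bitLength_le (m : Int) (by exact_mod_cast h)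
        simpa using this
      rw [ih (m - 2 ^ k) (by omega)]
      simp

theorem pv_foldl_term (l : List Int) (a : List Char) :
    l.foldl (fun p i => if i = 0 then p ++ ['1']
                        else p ++ ('x' :: '^' :: (PySem.Int.toChars i ++ [' ', '+']))) a
      = a ++ (l.map pvTerm).flatten := by
  induction l generalizing a with
  | nil => simp
  | cons x t ih => simp [pvTerm, ih]; split_ifs <;> simp

-- A's collecting fold as a filter over the Nat range
theorem pv_fold_filter (ds : List Char) :
    (PySem.List.pyRange 0 (ds.length : Int) 1).foldl
      (fun acc i => if PySem.List.pyGet? ds i = some '1' then acc ++ [i] else acc) ([] : List Int)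
      = ((List.range ds.length).filter (fun j => decide (ds[j]? = some '1'))).map
          (fun (j : Nat) => (j : Int)) := by
  rw [PySem.List.pyRange_zero_natCast, List.foldl_map]
  simp only [PySem.List.pyGet?_natCast]
  have : ∀ (l : List Nat) (acc : List Int),
      l.foldl (fun acc (j : Nat) => if ds[j]? = some '1' then acc ++ [(j : Int)] else acc) acc
        = acc ++ (l.filter (fun j => decide (ds[j]? = some '1'))).map (fun (j : Nat) => (j : Int)) := by
    intro l
    induction l with
    | nil => simp
    | cons x t ih =>
      intro acc
      simp only [List.foldl_cons, List.filter_cons]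
      by_cases h : ds[x]? = some '1' <;> simp [h, ih]
  simpa using this (List.range ds.length) []

-- toDigitsCore: accumulator comes out as an append
theorem pv_toDigitsCore_acc (b : Nat) : ∀ (f n : Nat) (ds : List Char),
    Nat.toDigitsCore b f n ds = Nat.toDigitsCore b f n [] ++ ds := by
  intro f
  induction f with
  | zero => intro n ds; simp [Nat.toDigitsCore]
  | succ g ih =>
    intro n ds
    simp only [Nat.toDigitsCore]
    by_cases h : n / b = 0
    · simp [h]
    · simp only [h, if_false]
      rw [ih (n / b) ((n % b).digitChar :: ds), ih (n / b) [(n % b).digitChar]]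
      simp

-- toDigitsCore (base 2): fuel does not matter once it exceeds n
theorem pv_toDigitsCore_fuel : ∀ (n f₁ f₂ : Nat), n < f₁ → n < f₂ →
    Nat.toDigitsCore 2 f₁ n [] = Nat.toDigitsCore 2 f₂ n [] := by
  intro n
  induction n using Nat.strong_induction_on with
  | _ n ih =>
    intro f₁ f₂ h₁ h₂
    match f₁, f₂ with
    | g₁ + 1, g₂ + 1 =>
      simp only [Nat.toDigitsCore]
      by_cases h : n / 2 = 0
      · simp [h]
      · simp only [h, if_false]
        have hlt : n / 2 < n := Nat.div_lt_self (by omega) (by omega)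
        rw [pv_toDigitsCore_acc 2 g₁, pv_toDigitsCore_acc 2 g₂,
          ih (n / 2) hlt g₁ g₂ (by omega) (by omega)]

-- binary digits recurrence
theorem pv_toDigits_two_step (m : Nat) (h : 2 ≤ m) :
    Nat.toDigits 2 m = Nat.toDigits 2 (m / 2) ++ [(m % 2).digitChar] := by
  have hne : ¬ m / 2 = 0 := by omega
  unfold Nat.toDigits
  conv_lhs => rw [show m + 1 = (m) + 1 from rfl]
  simp only [Nat.toDigitsCore, hne, if_false]
  rw [pv_toDigitsCore_acc 2 m (m / 2)]
  congr 1
  exact pv_toDigitsCore_fuel (m / 2) m (m / 2 + 1) (Nat.div_lt_self (by omega) (by omega)) (by omega)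

-- pvAsc recurrence: low bit plus shifted bits of m/2 (also holds at m = 0)
theorem pv_asc_step (m : Nat) :
    pvAsc m = (if m % 2 = 1 then [0] else []) ++ (pvAsc (m / 2)).map (· + 1) := by
  by_cases h : m = 0
  · subst h; decide
  · unfold pvAsc
    have hbl : PySem.Int.bitLength (m : Int) = PySem.Int.bitLength ((m / 2 : Nat) : Int) + 1 :=
      PySem.Int.bitLength_natCast (by omega)
    rw [hbl, List.range_succ_eq_map, List.filter_cons, List.filter_map]
    have h0 : m.testBit 0 = decide (m % 2 = 1) := by simp [Nat.testBit_zero]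
    have hs : (fun i : Nat => m.testBit i) ∘ Nat.succ = fun i : Nat => (m / 2).testBit i := by
      funext i; simp [Function.comp, Nat.testBit_add_one]
    rw [hs, h0]
    by_cases hp : m % 2 = 1 <;> simp [hp]

-- peeling the top set bit appends it at the end of pvAsc
theorem pv_asc_top (m : Nat) (h : 0 < m) :
    pvAsc m = pvAsc (m - 2 ^ (PySem.Int.bitLength (m : Int) - 1))
              ++ [PySem.Int.bitLength (m : Int) - 1] := by
  induction m using Nat.strong_induction_on with
  | _ m ih =>
    by_cases h1 : m = 1
    · subst h1; decide
    · have hm2 : 2 ≤ m := by omega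
      set k : Nat := PySem.Int.bitLength (m : Int) - 1 with hk
      have hbl : PySem.Int.bitLength (m : Int) = PySem.Int.bitLength ((m / 2 : Nat) : Int) + 1 :=
        PySem.Int.bitLength_natCast h
      have hhalfpos : 0 < m / 2 := by omega
      have hbl2 : PySem.Int.bitLength ((m / 2 : Nat) : Int)
          = PySem.Int.bitLength ((m / 2 / 2 : Nat) : Int) + 1 :=
        PySem.Int.bitLength_natCast hhalfpos
      have hk1 : 1 ≤ k := by omega
      have hk' : PySem.Int.bitLength ((m / 2 : Nat) : Int) - 1 = k - 1 := by omega
      have hpow : 2 ^ k = 2 * 2 ^ (k - 1) := by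
        conv_lhs => rw [show k = (k - 1) + 1 by omega]
        ring
      set a : Nat := 2 ^ (k - 1) with ha
      have hale : a ≤ m / 2 := by
        have h5 := PySem.Int.two_pow_bitLength_le ((m / 2 : Nat) : Int)
          (by exact_mod_cast (by omega : ¬ m / 2 = 0))
        rw [hk'] at h5
        simpa [ha] using h5
      have hra : m - 2 ^ k = m - 2 * a := by rw [hpow]
      have hmod : (m - 2 * a) % 2 = m % 2 := by omega
      have hdiv : (m - 2 * a) / 2 = m / 2 - a := by omega
      rw [pv_asc_step m, ih (m / 2) (by omega) hhalfpos, hk', hra,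
        pv_asc_step (m - 2 * a), hmod, hdiv]
      simp [ha, show k - 1 + 1 = k by omega]

-- pvTermsB is pvTerm mapped over the descending set bits
theorem pv_termsB_eq (m : Nat) :
    (pvTermsB m).flatten = (((pvAsc m).reverse).map (fun k : Nat => pvTerm (k : Int))).flatten := by
  induction m using Nat.strong_induction_on with
  | _ m ih =>
    by_cases h : m = 0
    · subst h; rw [pvTermsB.eq_def]; simp [pvAsc]
    · rw [pvTermsB.eq_def]
      simp only [h, dite_false]
      set k : Nat := PySem.Int.bitLength (m : Int) - 1 with hk
      have h1 : (1 : Nat) ≤ 2 ^ k := Nat.one_le_two_pow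
      have h2 : 2 ^ k ≤ m := by
        have := PySem.Int.two_pow_bitLength_le (m : Int) (by exact_mod_cast h)
        simpa using this
      rw [List.flatten_cons, ih (m - 2 ^ k) (by omega), pv_asc_top m (by omega), ← hk]
      simp only [List.reverse_append, List.reverse_cons, List.reverse_nil, List.nil_append,
        List.cons_append, List.map_cons, List.flatten_cons]
      congr 1
      unfold pvTerm
      by_cases h3 : k = 0
      · simp [h3]
      · rw [if_neg h3, if_neg (by omega : ¬ (k : Int) = 0)]

-- ones of the reversed binary digit string are exactly pvAsc
theorem pv_ones_digits (m : Nat) :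
    (List.range (Nat.toDigits 2 m).length).filter
        (fun j => decide (((Nat.toDigits 2 m).reverse)[j]? = some '1'))
      = pvAsc m := by
  induction m using Nat.strong_induction_on with
  | _ m ih =>
    by_cases h : m < 2
    · interval_cases m <;> decide
    · rw [pv_toDigits_two_step m (by omega)]
      have hrev : (Nat.toDigits 2 (m / 2) ++ [(m % 2).digitChar]).reverse
          = (m % 2).digitChar :: (Nat.toDigits 2 (m / 2)).reverse := by simp
      rw [hrev]
      have hlen : (Nat.toDigits 2 (m / 2) ++ [(m % 2).digitChar]).length
          = (Nat.toDigits 2 (m / 2)).length + 1 := by simp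
      rw [hlen, List.range_succ_eq_map, List.filter_cons, List.filter_map]
      have hhead : ((m % 2).digitChar :: (Nat.toDigits 2 (m / 2)).reverse)[0]?
          = some (m % 2).digitChar := rfl
      have htail : (fun j : Nat => decide (((m % 2).digitChar :: (Nat.toDigits 2 (m / 2)).reverse)[j]? = some '1')) ∘ Nat.succ
          = fun j : Nat => decide (((Nat.toDigits 2 (m / 2)).reverse)[j]? = some '1') := by
        funext j; simp
      rw [htail, ih (m / 2) (by omega), pv_asc_step m, hhead]
      have hd : ((m % 2).digitChar = '1') ↔ (m % 2 = 1) := by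
        have : m % 2 = 0 ∨ m % 2 = 1 := by omega
        rcases this with h0 | h0 <;> simp [h0, Nat.digitChar]
      by_cases hp : m % 2 = 1
      · simp [hp, Nat.digitChar]
      · have hm0 : m % 2 = 0 := by omega
        simp [hm0, Nat.digitChar]

-- the '1' positions of A's reversed slice, as Ints, for both signs of n
theorem pv_positions (n : Int) :
    ((List.range ((PySem.List.slice (PySem.Int.pyBin n).toList (some 2) none).reverse.length)).filter
        (fun j => decide (((PySem.List.slice (PySem.Int.pyBin n).toList (some 2) none).reverse)[j]? = some '1')))
      = pvAsc n.natAbs := by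
  have h2 : (2 : Int) = ((2 : Nat) : Int) := rfl
  rw [PySem.Int.toList_pyBin]
  by_cases hn : n < 0
  · -- toBinChars0b = '-' :: '0' :: 'b' :: digits; drop 2 = 'b' :: digits
    have hb : PySem.Int.toBinChars0b n = '-' :: '0' :: 'b' :: Nat.toDigits 2 n.natAbs := by
      simp [PySem.Int.toBinChars0b, hn]
    rw [hb, h2, PySem.List.slice_from_natCast]
    have hdrop : (('-' :: '0' :: 'b' :: Nat.toDigits 2 n.natAbs).drop 2)
        = 'b' :: Nat.toDigits 2 n.natAbs := rfl
    rw [hdrop]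
    have hrev : ('b' :: Nat.toDigits 2 n.natAbs).reverse
        = (Nat.toDigits 2 n.natAbs).reverse ++ ['b'] := by simp
    rw [hrev]
    have hlen : ((Nat.toDigits 2 n.natAbs).reverse ++ ['b']).length
        = (Nat.toDigits 2 n.natAbs).length + 1 := by simp
    rw [hlen, List.range_succ, List.filter_append]
    have hmain : (List.range (Nat.toDigits 2 n.natAbs).length).filter
          (fun j => decide ((((Nat.toDigits 2 n.natAbs).reverse ++ ['b']))[j]? = some '1'))
        = (List.range (Nat.toDigits 2 n.natAbs).length).filter
          (fun j => decide (((Nat.toDigits 2 n.natAbs).reverse)[j]? = some '1')) := by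
      refine List.filter_congr fun j hj => ?_
      have hjlt : j < (Nat.toDigits 2 n.natAbs).length := by simpa using hj
      rw [List.getElem?_append_left (by simpa using hjlt)]
    rw [hmain, pv_ones_digits n.natAbs]
    simp
  · -- nonneg: toBinChars0b = '0' :: 'b' :: digits; drop 2 = digits
    have hb : PySem.Int.toBinChars0b n = '0' :: 'b' :: Nat.toDigits 2 n.toNat := by
      simp [PySem.Int.toBinChars0b, hn]
    rw [hb, h2, PySem.List.slice_from_natCast]
    have hdrop : (('0' :: 'b' :: Nat.toDigits 2 n.toNat).drop 2) = Nat.toDigits 2 n.toNat := rfl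
    rw [hdrop, List.length_reverse, pv_ones_digits n.toNat]
    congr 1
    omega

-- ===== VERDICT (by name: the statement is the Claim_ definition above) =====
theorem hex_polinomio_spec : Claim_equal_hex_polinomio := by
  intro hex _ hpre
  unfold Pre_hex_polinomio at hpre
  obtain ⟨n, h⟩ := Option.isSome_iff_exists.mp hpre
  unfold Spec_hex_polinomio hex_polinomio hex_polinomio_alt
  rw [h]
  simp only [PySem.List.slice?_none_none_neg_one, Option.getD_some]
  rw [pv_fold_filter, pv_positions n, ← List.map_reverse, pv_foldl_term, pv_partsB_acc,
    List.flatten_append, pv_termsB_eq n.natAbs]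
  simp [List.map_map, Function.comp_def]
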